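-- pv_equiv track=rewrite | github.com/Sagar0-0/DSA | Internship Experience/Internship_experience.py | internshipExp
-- ===== SOURCE A (Python) =====
-- def internshipExp(d, k, n, minExp, expGained):
-- 	# Write your code here
--     ex = []
--     for i,j in zip(minExp,expGained):
--         ex.append((i,j))
--     ex.sort(key=lambda x:x[1],reverse=True)
-- #     Sorting to get high experience first
--     for i in range(k):
--         for j in ex:
--             if j[0]<=d:
--                 d+=j[1]
--                 ex.remove(j)
--                 break
--     return d
-- ===== SOURCE B (Python) =====
-- def internshipExp(d, k, n, minExp, expGained):
--     # No sort: each round, one linear scan picks the first index holding the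
--     # maximum gain among currently-affordable tasks, then removes it by index.
--     rem = list(zip(minExp, expGained))
--     for _ in range(k):
--         best = -1
--         for idx in range(len(rem)):
--             if rem[idx][0] <= d and (best < 0 or rem[best][1] < rem[idx][1]):
--                 best = idx
--         if best >= 0:
--             d += rem.pop(best)[1]
--     return d
-- ===== Notes on version B (the rewrite author's own statement) =====
-- stated objective: alternative
-- what changed: B drops A's sort and per-round remove-by-value entirely: each round is one argmax scan over the remaining list in original order (first index holding the maximum affordable gain, matching A's stable-sort tie-break), removed by index.
import Mathlib
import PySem

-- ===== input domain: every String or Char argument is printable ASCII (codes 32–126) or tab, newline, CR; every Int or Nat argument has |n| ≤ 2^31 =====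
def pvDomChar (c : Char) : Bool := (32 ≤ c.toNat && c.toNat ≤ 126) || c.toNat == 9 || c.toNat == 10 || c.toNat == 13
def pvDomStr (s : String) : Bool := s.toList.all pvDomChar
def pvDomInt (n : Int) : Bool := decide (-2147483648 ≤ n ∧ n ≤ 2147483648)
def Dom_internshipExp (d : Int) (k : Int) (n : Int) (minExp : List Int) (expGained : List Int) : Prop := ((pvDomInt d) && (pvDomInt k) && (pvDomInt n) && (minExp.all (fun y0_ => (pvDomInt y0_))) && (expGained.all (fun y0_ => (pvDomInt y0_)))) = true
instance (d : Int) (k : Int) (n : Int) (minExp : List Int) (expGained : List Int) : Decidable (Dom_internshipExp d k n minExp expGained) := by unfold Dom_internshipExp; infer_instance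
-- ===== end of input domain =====

-- B removes A's sort entirely: each round one argmax scan over the remaining list (first index of the
-- maximal affordable gain = A's stable-sort tie-break), removed by index; objective: alternative.


-- ===== PORT A =====
-- inner 'for j in ex: if j[0]<=d: … break' = find the first affordable pair
def findFirstA (d : Int) : List (Int × Int) → Option (Int × Int)
  | [] => none
  | j :: rest => if j.1 ≤ d then some j else findFirstA d rest

-- one round of A's outer loop: take first affordable pair of the sorted list, ex.remove(j)
def stepA (st : Int × List (Int × Int)) : Int × List (Int × Int) :=
  match findFirstA st.1 st.2 with
  | some j => (st.1 + j.2, st.2.erase j)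
  | none => st

def internshipExp (d : Int) (k : Int) (n : Int) (minExp : List Int) (expGained : List Int) : Int :=
  let ex0 := (minExp.zip expGained).foldl (fun acc p => acc ++ [p]) []
  let ex := PySem.List.sorted ex0 (fun x => x.2) true
  ((PySem.List.pyRange 0 k 1).foldl (fun st _ => stepA st) (d, ex)).1

-- ===== PORT B =====
-- B's inner scan: first index of the maximal affordable gain, -1 if none
def bestScan (d : Int) (rem : List (Int × Int)) : Int :=
  (PySem.List.pyRange 0 (rem.length : Int) 1).foldl
    (fun best idx =>
      if (PySem.List.pyGetD rem idx (0, 0)).1 ≤ d ∧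
         (best < 0 ∨ (PySem.List.pyGetD rem best (0, 0)).2 < (PySem.List.pyGetD rem idx (0, 0)).2)
      then idx else best) (-1)

-- one round of B: if a task is affordable, add rem.pop(best)[1]
def stepB (st : Int × List (Int × Int)) : Int × List (Int × Int) :=
  let best := bestScan st.1 st.2
  if 0 ≤ best then
    match PySem.List.pop? st.2 best with
    | some (v, rest) => (st.1 + v.2, rest)
    | none => st
  else st

def internshipExp_alt (d : Int) (k : Int) (n : Int) (minExp : List Int) (expGained : List Int) : Int :=
  ((PySem.List.pyRange 0 k 1).foldl (fun st _ => stepB st) (d, minExp.zip expGained)).1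

-- ===== PRECONDITION & SPEC =====
def Spec_internshipExp (d : Int) (k : Int) (n : Int) (minExp : List Int) (expGained : List Int) (out : Int) : Prop := out = internshipExp_alt d k n minExp expGained
instance (d : Int) (k : Int) (n : Int) (minExp : List Int) (expGained : List Int) (out : Int) : Decidable (Spec_internshipExp d k n minExp expGained out) := by unfold Spec_internshipExp; infer_instance

-- ===== CLAIM (what is proved, stated in full; the proofs are below) =====
def Claim_equal_internshipExp : Prop := ∀ (d : Int) (k : Int) (n : Int) (minExp : List Int) (expGained : List Int), Dom_internshipExp d k n minExp expGained → Spec_internshipExp d k n minExp expGained (internshipExp d k n minExp expGained)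

-- ===== LEMMAS AND PROOFS =====

-- abbreviation for the insertion step of PySem's stable sort with key = gain, reverse = True
def pvIns (x : Int × Int) (A : List (Int × Int)) : List (Int × Int) :=
  PySem.List.insertBy (fun a b => decide (b.2 < a.2)) x A

lemma sorted_eq_foldl (l : List (Int × Int)) :
    PySem.List.sorted l (fun x => x.2) true = l.foldl (fun A x => pvIns x A) [] := rfl

lemma pvIns_nil (x : Int × Int) : pvIns x [] = [x] := rfl

lemma pvIns_cons (x y : Int × Int) (A : List (Int × Int)) :
    pvIns x (y :: A) = if y.2 < x.2 then x :: y :: A else y :: pvIns x A := by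
  simp [pvIns, PySem.List.insertBy]

lemma mem_pvIns {z x : Int × Int} {A : List (Int × Int)} :
    z ∈ pvIns x A ↔ z = x ∨ z ∈ A := by
  induction A with
  | nil => simp [pvIns_nil]
  | cons y A ih =>
    rw [pvIns_cons]
    split_ifs <;> simp [ih] <;> tauto

lemma pairwise_pvIns {x : Int × Int} {A : List (Int × Int)}
    (h : A.Pairwise (fun a b => b.2 ≤ a.2)) :
    (pvIns x A).Pairwise (fun a b : Int × Int => b.2 ≤ a.2) := by
  induction A with
  | nil => simp [pvIns_nil]
  | cons y A ih =>
    rw [pvIns_cons]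
    rcases List.pairwise_cons.mp h with ⟨hy, hA⟩
    split_ifs with hlt
    · exact List.pairwise_cons.mpr ⟨by
        intro z hz
        rcases List.mem_cons.mp hz with rfl | hz
        · exact le_of_lt hlt
        · exact le_trans (hy z hz) (le_of_lt hlt), h⟩
    · exact List.pairwise_cons.mpr ⟨by
        intro z hz
        rcases mem_pvIns.mp hz with rfl | hz
        · exact le_of_not_gt hlt
        · exact hy z hz, ih hA⟩

lemma pvIns_split (x : Int × Int) (A : List (Int × Int)) :
    ∃ u v, pvIns x A = u ++ x :: v ∧ A = u ++ v := by
  induction A with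
  | nil => exact ⟨[], [], rfl, rfl⟩
  | cons y A ih =>
    rw [pvIns_cons]
    split_ifs
    · exact ⟨[], y :: A, rfl, rfl⟩
    · rcases ih with ⟨u, v, h1, h2⟩
      exact ⟨y :: u, v, by simp [h1], by simp [h2]⟩

-- inserting y preserves the "one marked x inside a sorted list" shape
lemma pvIns_shape {x : Int × Int} :
    ∀ (u v : List (Int × Int)) (y : Int × Int), x ∉ u →
    (u ++ x :: v).Pairwise (fun a b => b.2 ≤ a.2) →
    ∃ u' v', pvIns y (u ++ x :: v) = u' ++ x :: v' ∧ pvIns y (u ++ v) = u' ++ v' ∧ x ∉ u' := by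
  intro u
  induction u with
  | nil =>
    intro v y _ hp
    simp only [List.nil_append] at hp ⊢
    rw [pvIns_cons]
    split_ifs with hlt
    · refine ⟨[y], v, rfl, ?_, ?_⟩
      · cases v with
        | nil => rfl
        | cons z v2 =>
          rw [pvIns_cons]
          have hz : z.2 ≤ x.2 := (List.pairwise_cons.mp hp).1 z (by simp)
          rw [if_pos (lt_of_le_of_lt hz hlt)]
          rfl
      · intro hx
        simp only [List.mem_singleton] at hx
        exact absurd hlt (by rw [hx]; exact lt_irrefl _)
    · exact ⟨[], pvIns y v, rfl, rfl, by simp⟩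
  | cons a u2 ih =>
    intro v y hxu hp
    simp only [List.cons_append] at hp ⊢
    rw [pvIns_cons, pvIns_cons]
    split_ifs with hlt
    · refine ⟨y :: a :: u2, v, rfl, rfl, ?_⟩
      intro hx
      rcases List.mem_cons.mp hx with rfl | hx
      · have hax : x.2 ≤ a.2 := (List.pairwise_cons.mp hp).1 x (by simp)
        exact absurd hlt (not_lt.mpr hax)
      · exact hxu (by
          rcases List.mem_cons.mp hx with rfl | hx2
          · simp
          · simp [hx2])
    · rcases ih v y (fun h => hxu (List.mem_cons_of_mem a h)) (List.pairwise_cons.mp hp).2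
        with ⟨u', v', h1, h2, h3⟩
      refine ⟨a :: u', v', by simp [h1], by simp [h2], ?_⟩
      intro hx
      rcases List.mem_cons.mp hx with rfl | hx
      · exact hxu (by simp)
      · exact h3 hx

lemma foldl_ins_erase {x : Int × Int} :
    ∀ (q u v : List (Int × Int)), x ∉ u →
    (u ++ x :: v).Pairwise (fun a b => b.2 ≤ a.2) →
    (q.foldl (fun A z => pvIns z A) (u ++ x :: v)).erase x
      = q.foldl (fun A z => pvIns z A) (u ++ v) := by
  intro q
  induction q with
  | nil =>
    intro u v hxu _
    simp only [List.foldl_nil]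
    rw [List.erase_append_right _ hxu, List.erase_cons_head]
  | cons y q ih =>
    intro u v hxu hp
    simp only [List.foldl_cons]
    rcases pvIns_shape u v y hxu hp with ⟨u', v', h1, h2, h3⟩
    rw [h1, h2]
    exact ih u' v' h3 (by rw [← h1]; exact pairwise_pvIns hp)

lemma foldl_ins_erase_of_mem {x : Int × Int} :
    ∀ (l A : List (Int × Int)), A.Pairwise (fun a b => b.2 ≤ a.2) → x ∉ A → x ∈ l →
    (l.foldl (fun A z => pvIns z A) A).erase x
      = (l.erase x).foldl (fun A z => pvIns z A) A := by
  intro l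
  induction l with
  | nil => intro A _ _ h; exact absurd h (List.not_mem_nil)
  | cons y l ih =>
    intro A hp hxA hxl
    by_cases hxy : y = x
    · subst hxy
      rw [List.erase_cons_head]
      simp only [List.foldl_cons]
      rcases pvIns_split y A with ⟨u, v, h1, h2⟩
      have hxu : y ∉ u := fun h => hxA (h2 ▸ List.mem_append_left v h)
      rw [h1]
      exact foldl_ins_erase l u v hxu (by rw [← h1]; exact pairwise_pvIns hp) |>.trans
        (by rw [← h2])
    · have hxl' : x ∈ l := by
        rcases List.mem_cons.mp hxl with h | h
        · exact absurd h.symm hxy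
        · exact h
      rw [List.erase_cons_tail (by simp [hxy])]
      simp only [List.foldl_cons]
      exact ih (pvIns y A) (pairwise_pvIns hp)
        (fun h => (mem_pvIns.mp h).elim (fun h => hxy h.symm) hxA) hxl'

-- erasing the picked element commutes with the stable sort
lemma sorted_erase {x : Int × Int} {l : List (Int × Int)} (hx : x ∈ l) :
    (PySem.List.sorted l (fun z => z.2) true).erase x
      = PySem.List.sorted (l.erase x) (fun z => z.2) true := by
  rw [sorted_eq_foldl, sorted_eq_foldl]
  exact foldl_ins_erase_of_mem l [] (by simp) (List.not_mem_nil) hx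

-- the reference pick: B's greedy choice expressed as a fold over the original list
def pickStep (d : Int) (acc : Option (Int × Int)) (x : Int × Int) : Option (Int × Int) :=
  match acc with
  | none => if x.1 ≤ d then some x else none
  | some j => if x.1 ≤ d ∧ j.2 < x.2 then some x else some j

def pickRef (d : Int) (l : List (Int × Int)) : Option (Int × Int) :=
  l.foldl (pickStep d) none

lemma findFirstA_mem {d : Int} : ∀ {A : List (Int × Int)} {j : Int × Int},
    findFirstA d A = some j → j ∈ A := by
  intro A
  induction A with
  | nil => intro j h; simp [findFirstA] at h
  | cons y A ih =>
    intro j h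
    rw [findFirstA] at h
    split_ifs at h with hy
    · simp [← Option.some_inj.mp h]
    · exact List.mem_cons_of_mem y (ih h)

lemma findFirstA_pvIns {d : Int} {x : Int × Int} :
    ∀ {A : List (Int × Int)}, A.Pairwise (fun a b => b.2 ≤ a.2) →
    findFirstA d (pvIns x A) = pickStep d (findFirstA d A) x := by
  intro A
  induction A with
  | nil =>
    intro _
    simp only [pvIns_nil, findFirstA, pickStep]
  | cons a A ih =>
    intro hp
    rw [pvIns_cons]
    split_ifs with hlt
    · -- x inserted in front
      rw [show findFirstA d (x :: a :: A) = if x.1 ≤ d then some x else findFirstA d (a :: A)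
        from rfl]
      split_ifs with hxd
      · cases hacc : findFirstA d (a :: A) with
        | none => simp [pickStep, hxd]
        | some j =>
          have hj2 : j.2 ≤ a.2 := by
            rcases List.mem_cons.mp (findFirstA_mem hacc) with rfl | hjm
            · exact le_refl _
            · exact (List.pairwise_cons.mp hp).1 j hjm
          simp [pickStep, hxd, lt_of_le_of_lt hj2 hlt]
      · cases hacc : findFirstA d (a :: A) with
        | none => simp [pickStep, hxd]
        | some j => simp [pickStep, hxd]
    · -- x inserted after a
      rw [show findFirstA d (a :: pvIns x A) = if a.1 ≤ d then some a else findFirstA d (pvIns x A)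
        from rfl,
        show findFirstA d (a :: A) = if a.1 ≤ d then some a else findFirstA d A from rfl]
      split_ifs with had
      · simp only [pickStep]
        rw [if_neg (fun h => absurd h.2 hlt)]
      · exact ih (List.pairwise_cons.mp hp).2

lemma findFirstA_foldl {d : Int} :
    ∀ (l A : List (Int × Int)), A.Pairwise (fun a b => b.2 ≤ a.2) →
    findFirstA d (l.foldl (fun A z => pvIns z A) A) = l.foldl (pickStep d) (findFirstA d A) := by
  intro l
  induction l with
  | nil => intro A _; rfl
  | cons y l ih =>
    intro A hp
    simp only [List.foldl_cons]
    rw [ih (pvIns y A) (pairwise_pvIns hp), findFirstA_pvIns hp]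

lemma findFirstA_sorted {d : Int} (l : List (Int × Int)) :
    findFirstA d (PySem.List.sorted l (fun z => z.2) true) = pickRef d l := by
  rw [sorted_eq_foldl]
  exact findFirstA_foldl l [] (by simp)

lemma pick_max {d : Int} : ∀ (l : List (Int × Int)) (acc : Option (Int × Int)) (z : Int × Int),
    ((z ∈ l ∧ z.1 ≤ d) ∨ (∃ j0, acc = some j0 ∧ z.2 ≤ j0.2)) →
    ∃ j, l.foldl (pickStep d) acc = some j ∧ z.2 ≤ j.2 := by
  intro l
  induction l with
  | nil =>
    intro acc z h
    rcases h with ⟨h, _⟩ | ⟨j0, rfl, hj0⟩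
    · exact absurd h (List.not_mem_nil)
    · exact ⟨j0, rfl, hj0⟩
  | cons x l ih =>
    intro acc z h
    simp only [List.foldl_cons]
    apply ih
    rcases h with ⟨hm, hzd⟩ | ⟨j0, rfl, hj0⟩
    · rcases List.mem_cons.mp hm with rfl | hm
      · -- z is the head; after pickStep the acc bounds z.2
        right
        cases acc with
        | none => exact ⟨z, by simp [pickStep, hzd], le_refl _⟩
        | some j =>
          by_cases hc : z.1 ≤ d ∧ j.2 < z.2
          · exact ⟨z, by simp [pickStep, hc], le_refl _⟩
          · refine ⟨j, by simp [pickStep, hc], ?_⟩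
            rcases not_and_or.mp hc with h1 | h2
            · exact absurd hzd h1
            · exact le_of_not_gt h2
      · exact Or.inl ⟨hm, hzd⟩
    · right
      cases hs : pickStep d (some j0) x with
      | none => simp only [pickStep] at hs; split_ifs at hs
      | some j1 =>
        refine ⟨j1, rfl, le_trans hj0 ?_⟩
        simp only [pickStep] at hs
        split_ifs at hs with hc
        · exact le_of_lt (Option.some_inj.mp hs ▸ hc.2)
        · exact le_of_eq (congrArg Prod.snd (Option.some_inj.mp hs))

lemma pick_mem {d : Int} : ∀ (l : List (Int × Int)) (acc : Option (Int × Int)) (v : Int × Int),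
    l.foldl (pickStep d) acc = some v → (v ∈ l ∧ v.1 ≤ d) ∨ acc = some v := by
  intro l
  induction l with
  | nil => intro acc v h; exact Or.inr h
  | cons x l ih =>
    intro acc v h
    simp only [List.foldl_cons] at h
    rcases ih _ v h with ⟨hm, hd⟩ | heq
    · exact Or.inl ⟨List.mem_cons_of_mem x hm, hd⟩
    · cases acc with
      | none =>
        simp only [pickStep] at heq
        split_ifs at heq with hc
        exact Or.inl ⟨by simp [← Option.some_inj.mp heq], Option.some_inj.mp heq ▸ hc⟩

      | some j =>
        simp only [pickStep] at heq
        split_ifs at heq with hc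
        · exact Or.inl ⟨by simp [← Option.some_inj.mp heq], Option.some_inj.mp heq ▸ hc.1⟩
        · exact Or.inr heq

lemma getD_append_len (u w : List (Int × Int)) (v dflt : Int × Int) :
    (u ++ v :: w).getD u.length dflt = v := by
  induction u with
  | nil => rfl
  | cons a u ih => simpa using ih

lemma eraseIdx_append_len (u w : List (Int × Int)) (v : Int × Int) :
    (u ++ v :: w).eraseIdx u.length = u ++ w := by
  induction u with
  | nil => rfl
  | cons a u ih => simpa using ih

lemma getElem?_append_len (u w : List (Int × Int)) (v : Int × Int) :
    (u ++ v :: w)[u.length]? = some v := by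
  induction u with
  | nil => rfl
  | cons a u ih => simpa using ih

-- the invariant tying B's running best index to the reference pick over the processed prefix
def BInv (d : Int) (l : List (Int × Int)) (t : Nat) (best : Int) : Prop :=
  ((l.take t).foldl (pickStep d) none = none ∧ best = -1)
  ∨ (∃ v u w, (l.take t).foldl (pickStep d) none = some v ∧ l = u ++ v :: w
      ∧ best = (u.length : Int) ∧ u.length < t ∧ v ∉ u)

lemma bestScan_inv (d : Int) (l : List (Int × Int)) :
    ∀ t, t ≤ l.length →
    BInv d l t ((List.range t).foldl
      (fun (best : Int) (idx : Nat) =>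
        if (PySem.List.pyGetD l (idx : Int) (0, 0)).1 ≤ d ∧
           (best < 0 ∨ (PySem.List.pyGetD l best (0, 0)).2 < (PySem.List.pyGetD l (idx : Int) (0, 0)).2)
        then (idx : Int) else best) (-1)) := by
  intro t
  induction t with
  | zero => intro _; exact Or.inl ⟨rfl, rfl⟩
  | succ t ih =>
    intro ht
    have ht' : t < l.length := by omega
    rw [List.range_succ, List.foldl_append]
    have hx : PySem.List.pyGetD l (t : Int) (0, 0) = l[t] := by
      rw [PySem.List.pyGetD_natCast, List.getD_eq_getElem _ _ ht']
    have htake : l.take (t + 1) = l.take t ++ [l[t]] := by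
      rw [List.take_add_one]
      simp [List.getElem?_eq_getElem ht']
    have hdec : l = l.take t ++ l[t] :: l.drop (t + 1) := by
      conv_lhs => rw [← List.take_append_drop t l]
      rw [List.drop_eq_getElem_cons ht']
    simp only [List.foldl_cons, List.foldl_nil]
    rcases ih (by omega) with ⟨hpick, hbest⟩ | ⟨v, u, w, hpick, hl, hbest, hlt, hvu⟩
    · rw [hbest, hx]
      by_cases hxd : (l[t] : Int × Int).1 ≤ d
      · rw [if_pos ⟨hxd, Or.inl (by norm_num)⟩]
        refine Or.inr ⟨l[t], l.take t, l.drop (t + 1), ?_, hdec, ?_, ?_, ?_⟩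
        · rw [htake, List.foldl_append, hpick]
          simp [pickStep, hxd]
        · rw [List.length_take_of_le (le_of_lt ht')]
        · rw [List.length_take_of_le (le_of_lt ht')]; omega
        · intro hmem
          rcases pick_max (l.take t) none l[t] (Or.inl ⟨hmem, hxd⟩) with ⟨j, hj, _⟩
          rw [hpick] at hj; exact absurd hj (by simp)
      · rw [if_neg (fun h => hxd h.1)]
        refine Or.inl ⟨?_, rfl⟩
        rw [htake, List.foldl_append, hpick]
        simp [pickStep, hxd]
    · rw [hbest, hx]
      have hgetb : PySem.List.pyGetD l ((u.length : Nat) : Int) (0, 0) = v := by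
        rw [PySem.List.pyGetD_natCast, hl, getD_append_len]
      rw [hgetb]
      have hnneg : ¬ ((u.length : Int) < 0) := by
        simp
      by_cases hc : (l[t] : Int × Int).1 ≤ d ∧ v.2 < (l[t] : Int × Int).2
      · rw [if_pos ⟨hc.1, Or.inr hc.2⟩]
        refine Or.inr ⟨l[t], l.take t, l.drop (t + 1), ?_, hdec, ?_, ?_, ?_⟩
        · rw [htake, List.foldl_append, hpick]
          simp [pickStep, hc.1, hc.2]
        · rw [List.length_take_of_le (le_of_lt ht')]
        · rw [List.length_take_of_le (le_of_lt ht')]; omega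
        · intro hmem
          rcases pick_max (l.take t) none l[t] (Or.inl ⟨hmem, hc.1⟩) with ⟨j, hj, hle⟩
          rw [hpick] at hj
          have : j = v := (Option.some_inj.mp hj).symm
          subst this
          exact absurd hc.2 (not_lt.mpr hle)
      · rw [if_neg (by
          rintro ⟨h1, h2 | h3⟩
          · exact hnneg h2
          · exact hc ⟨h1, h3⟩)]
        refine Or.inr ⟨v, u, w, ?_, hl, rfl, by omega, hvu⟩
        rw [htake, List.foldl_append, hpick]
        simp only [List.foldl_cons, List.foldl_nil, pickStep]
        rw [if_neg hc]

lemma bestScan_spec (d : Int) (l : List (Int × Int)) :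
    BInv d l l.length (bestScan d l) := by
  have h := bestScan_inv d l l.length (le_refl _)
  rw [bestScan, PySem.List.pyRange_zero_natCast, List.foldl_map]
  exact h

-- one round of A on the sorted list = one round of B on the original list, re-sorted
lemma step_eq (dd : Int) (rem : List (Int × Int)) :
    stepA (dd, PySem.List.sorted rem (fun z => z.2) true)
      = ((stepB (dd, rem)).1, PySem.List.sorted (stepB (dd, rem)).2 (fun z => z.2) true) := by
  have hpick : findFirstA dd (PySem.List.sorted rem (fun z => z.2) true) = pickRef dd rem :=
    findFirstA_sorted rem
  rcases bestScan_spec dd rem with ⟨hnone, hbest⟩ | ⟨v, u, w, hsome, hl, hbest, hlt, hvu⟩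
  · -- nothing affordable: both rounds keep the state
    rw [List.take_length] at hnone
    have : pickRef dd rem = none := hnone
    rw [stepA]
    simp only [hpick, this]
    rw [stepB]
    simp only [hbest]
    norm_num
  · rw [List.take_length] at hsome
    have hvrem : v ∈ rem := by
      rcases pick_mem rem none v hsome with ⟨h, _⟩ | h
      · exact h
      · exact absurd h (by simp)
    have hulen : u.length < rem.length := by rw [hl]; simp
    rw [stepA]
    simp only [hpick, pickRef, hsome]
    rw [stepB]
    simp only [hbest]
    rw [if_pos (by positivity)]
    have hpop : PySem.List.pop? rem ((u.length : Nat) : Int) = some (v, u ++ w) := by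
      rw [PySem.List.pop?]
      simp only [PySem.List.pyIdx?]
      rw [if_pos (by positivity), if_pos (by exact_mod_cast hulen)]
      simp only [Int.toNat_natCast, Option.bind_some]
      rw [hl, getElem?_append_len, eraseIdx_append_len]
      rfl
    rw [hpop]
    have herase : rem.erase v = u ++ w := by
      rw [hl, List.erase_append_right _ hvu, List.erase_cons_head]
    rw [sorted_erase hvrem, herase]

lemma foldl_rounds (q : List Int) :
    ∀ (dd : Int) (rem : List (Int × Int)),
    q.foldl (fun st _ => stepA st) (dd, PySem.List.sorted rem (fun z => z.2) true)
      = ((q.foldl (fun st _ => stepB st) (dd, rem)).1,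
         PySem.List.sorted (q.foldl (fun st _ => stepB st) (dd, rem)).2 (fun z => z.2) true) := by
  induction q with
  | nil => intro dd rem; rfl
  | cons y q ih =>
    intro dd rem
    simp only [List.foldl_cons]
    rw [step_eq]
    exact ih (stepB (dd, rem)).1 (stepB (dd, rem)).2

-- ===== VERDICT (by name: the statement is the Claim_ definition above) =====
theorem internshipExp_spec : Claim_equal_internshipExp := by
  intro d k n minExp expGained _
  unfold Spec_internshipExp internshipExp internshipExp_alt
  rw [PySem.List.foldl_append_singleton]
  simp only [List.nil_append]
  rw [foldl_rounds]
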